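-- pv_equiv track=rewrite | github.com/sylinrl/CalibratedMath | prompts.py | generate_math_prompt
-- ===== SOURCE A (Python) =====
-- def generate_math_prompt(operation, x1, x2, separator, x3=None):
--
--     if len(separator):
--         x1_string = '{:,}'.format(x1)
--         x2_string = '{:,}'.format(x2)
--     else:
--         x1_string = str(x1)
--         x2_string = str(x2)
--     x3_string = str(x3)
--
--     prompt = ''
--
--     if operation == '%':
--         prompt += 'Q: What is {0}% of {1}?\nA:'.format(x2_string, x1_string)
--     elif operation == '<':
--         prompt += 'Q: Name any number smaller than {0}?\nA:'.format(x1_string)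
--     elif operation == '>':
--         prompt += 'Q: Name any number larger than {0}?\nA:'.format(x1_string)
--     elif operation == 'prime':
--         prompt += 'Q: Name any prime number smaller than {0}?\nA:'.format(x1_string)
--     elif operation == 'square':
--         prompt += 'Q: Name any perfect square smaller than {0}?\nA:'.format(x1_string)
--     elif operation == '2sum':
--         prompt += 'Q: Name two numbers that sum to {0}?\nA:'.format(x1_string)
--     elif operation == 'multiple':
--         prompt += 'Q: Name a single multiple of {0} between {1} and {2}?\nA:'.format(x3_string, x1_string, x2_string)
--     elif operation == 'round':
--         prompt += 'Q: What is {0} rounded to the nearest {1}?\nA:'.format(x1_string, x2_string)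
--     elif operation == 'remain':
--         prompt += 'Q: What is the remainder when {0} is divided by {1}?\nA:'.format(x1_string, x2_string)
--     elif operation == 'seq':
--         seq_vals = [x1, x1 + x2, x1 + 2*x2, x1 + 3*x2]
--         if len(separator):
--             seq_strings = ['{:,}'.format(s) for s in seq_vals]
--         else:
--             seq_strings = [str(s) for s in seq_vals]
--         prompt += 'Q: What comes next: {0}, {1}, {2}, {3}...?\nA:'.format(*seq_strings)
--     elif operation in ['v+']:
--         prompt += 'Q: What is {1} more than {0}?\nA:'.format(x1_string, x2_string)
--     elif operation in ['v-']:
--         prompt += 'Q: What is {1} less than {0}?\nA:'.format(x1_string, x2_string)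
--     elif operation in ['3*', '3+', '3-']:
--         prompt += 'Q: What is {0} {3} {1} {3} {2}?\nA:'.format(x1_string, x2_string, x3_string, operation[-1])
--     elif operation in ['frac']:
--         prompt += 'Q: What is {0}/{1} in reduced form?\nA:'.format(x1_string, x2_string)
--     else:
--         prompt += 'Q: What is {0} {1} {2}?\nA:'.format(x1_string, operation, x2_string)
--
--     return prompt
-- ===== SOURCE B (Python) =====
-- # B: data-driven template engine — the per-operation branches become a constant
-- # table of template strings with numbered slots, rendered by one generic scan.
--
-- _TEMPLATES = {
--     '%': 'Q: What is {1}% of {0}?\nA:',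
--     '<': 'Q: Name any number smaller than {0}?\nA:',
--     '>': 'Q: Name any number larger than {0}?\nA:',
--     'prime': 'Q: Name any prime number smaller than {0}?\nA:',
--     'square': 'Q: Name any perfect square smaller than {0}?\nA:',
--     '2sum': 'Q: Name two numbers that sum to {0}?\nA:',
--     'multiple': 'Q: Name a single multiple of {2} between {0} and {1}?\nA:',
--     'round': 'Q: What is {0} rounded to the nearest {1}?\nA:',
--     'remain': 'Q: What is the remainder when {0} is divided by {1}?\nA:',
--     'seq': 'Q: What comes next: {4}, {5}, {6}, {7}...?\nA:',
--     'v+': 'Q: What is {1} more than {0}?\nA:',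
--     'v-': 'Q: What is {1} less than {0}?\nA:',
--     '3*': 'Q: What is {0} {3} {1} {3} {2}?\nA:',
--     '3+': 'Q: What is {0} {3} {1} {3} {2}?\nA:',
--     '3-': 'Q: What is {0} {3} {1} {3} {2}?\nA:',
--     'frac': 'Q: What is {0}/{1} in reduced form?\nA:',
-- }
-- _DEFAULT = 'Q: What is {0} {8} {1}?\nA:'
--
--
-- def _render(template, slots):
--     # one scan; '{' is always followed by a single digit and '}' in our templates,
--     # and substituted text is never re-scanned
--     out = []
--     i = 0
--     while i < len(template):
--         c = template[i]
--         if c == '{':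
--             out.append(slots[int(template[i + 1])])
--             i += 3
--         else:
--             out.append(c)
--             i += 1
--     return ''.join(out)
--
--
-- def generate_math_prompt(operation, x1, x2, separator, x3=None):
--     fmt = '{:,}'.format if len(separator) else str
--     slots = [fmt(x1), fmt(x2), str(x3), operation[-1:],
--              fmt(x1), fmt(x1 + x2), fmt(x1 + 2 * x2), fmt(x1 + 3 * x2),
--              operation]
--     return _render(_TEMPLATES.get(operation, _DEFAULT), slots)
-- ===== Notes on version B (the rewrite author's own statement) =====
-- stated objective: alternative
-- what changed: Replaces A's 15-branch if/elif chain of format calls with a data-driven template engine: a constant table maps each operation to a slot-numbered template string and one generic scanning loop renders it by substituting a slots vector computed once (operation[-1:] and the seq terms are ordinary slots), with a default template for unknown operations.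
import Mathlib
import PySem

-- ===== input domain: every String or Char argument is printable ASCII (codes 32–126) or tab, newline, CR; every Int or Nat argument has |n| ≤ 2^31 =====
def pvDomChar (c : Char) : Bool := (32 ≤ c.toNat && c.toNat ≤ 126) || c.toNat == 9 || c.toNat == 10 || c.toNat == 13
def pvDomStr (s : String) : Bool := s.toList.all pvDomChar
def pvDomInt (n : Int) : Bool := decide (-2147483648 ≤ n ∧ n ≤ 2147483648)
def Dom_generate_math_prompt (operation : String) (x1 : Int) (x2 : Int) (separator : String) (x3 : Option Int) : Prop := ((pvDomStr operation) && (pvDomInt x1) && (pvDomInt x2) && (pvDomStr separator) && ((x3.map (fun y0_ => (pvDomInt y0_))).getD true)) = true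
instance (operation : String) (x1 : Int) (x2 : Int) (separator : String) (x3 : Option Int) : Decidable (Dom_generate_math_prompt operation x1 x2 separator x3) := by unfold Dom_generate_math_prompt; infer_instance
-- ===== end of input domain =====

-- B replaces A's 15-way if/elif chain by a constant table of slot-numbered template
-- strings rendered by one generic scanning loop (alternative decomposition); return value only.

-- ===== PORT A =====
-- Python "'{:,}'.format(n)": thousands grouping with commas; exact for ints.
-- pvGroup3 works on the REVERSED digit list, inserting ',' after every 3 digits.
def pvGroup3 : List Char → List Char
  | a :: b :: c :: d :: rest => a :: b :: c :: ',' :: pvGroup3 (d :: rest)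
  | l => l

def pvCommaFmt (n : Int) : String :=
  (if n < 0 then "-" else "") ++ String.ofList (pvGroup3 (PySem.Int.toChars (n.natAbs : Int)).reverse).reverse

-- Python "str(x3)" on an Optional[int]: 'None' or str(n)
def pvStrOpt (o : Option Int) : String :=
  match o with
  | none => "None"
  | some n => PySem.Int.toStr n

def generate_math_prompt (operation : String) (x1 : Int) (x2 : Int) (separator : String) (x3 : Option Int) : String :=
  let x1_string := if separator.toList.length ≠ 0 then pvCommaFmt x1 else PySem.Int.toStr x1
  let x2_string := if separator.toList.length ≠ 0 then pvCommaFmt x2 else PySem.Int.toStr x2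
  let x3_string := pvStrOpt x3
  if operation == "%" then
    "Q: What is " ++ x2_string ++ "% of " ++ x1_string ++ "?\nA:"
  else if operation == "<" then
    "Q: Name any number smaller than " ++ x1_string ++ "?\nA:"
  else if operation == ">" then
    "Q: Name any number larger than " ++ x1_string ++ "?\nA:"
  else if operation == "prime" then
    "Q: Name any prime number smaller than " ++ x1_string ++ "?\nA:"
  else if operation == "square" then
    "Q: Name any perfect square smaller than " ++ x1_string ++ "?\nA:"
  else if operation == "2sum" then
    "Q: Name two numbers that sum to " ++ x1_string ++ "?\nA:"
  else if operation == "multiple" then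
    "Q: Name a single multiple of " ++ x3_string ++ " between " ++ x1_string ++ " and " ++ x2_string ++ "?\nA:"
  else if operation == "round" then
    "Q: What is " ++ x1_string ++ " rounded to the nearest " ++ x2_string ++ "?\nA:"
  else if operation == "remain" then
    "Q: What is the remainder when " ++ x1_string ++ " is divided by " ++ x2_string ++ "?\nA:"
  else if operation == "seq" then
    let seq_vals : List Int := [x1, x1 + x2, x1 + 2 * x2, x1 + 3 * x2]
    let seq_strings := if separator.toList.length ≠ 0 then seq_vals.map pvCommaFmt else seq_vals.map PySem.Int.toStr
    "Q: What comes next: " ++ seq_strings.getD 0 "" ++ ", " ++ seq_strings.getD 1 "" ++ ", " ++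
      seq_strings.getD 2 "" ++ ", " ++ seq_strings.getD 3 "" ++ "...?\nA:"
  else if operation == "v+" then
    "Q: What is " ++ x2_string ++ " more than " ++ x1_string ++ "?\nA:"
  else if operation == "v-" then
    "Q: What is " ++ x2_string ++ " less than " ++ x1_string ++ "?\nA:"
  else if operation == "3*" || operation == "3+" || operation == "3-" then
    let op_last := ((PySem.Str.pyGet? operation (-1)).getD ' ').toString
    "Q: What is " ++ x1_string ++ " " ++ op_last ++ " " ++ x2_string ++ " " ++ op_last ++ " " ++ x3_string ++ "?\nA:"
  else if operation == "frac" then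
    "Q: What is " ++ x1_string ++ "/" ++ x2_string ++ " in reduced form?\nA:"
  else
    "Q: What is " ++ x1_string ++ " " ++ operation ++ " " ++ x2_string ++ "?\nA:"

-- ===== PORT B =====
-- Source B's constant template table (slot k = slots[k] of the renderer)
def pvTemplates : PySem.Dict String String :=
  PySem.Dict.ofList
    [ ("%",        "Q: What is {1}% of {0}?\nA:")
    , ("<",        "Q: Name any number smaller than {0}?\nA:")
    , (">",        "Q: Name any number larger than {0}?\nA:")
    , ("prime",    "Q: Name any prime number smaller than {0}?\nA:")
    , ("square",   "Q: Name any perfect square smaller than {0}?\nA:")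
    , ("2sum",     "Q: Name two numbers that sum to {0}?\nA:")
    , ("multiple", "Q: Name a single multiple of {2} between {0} and {1}?\nA:")
    , ("round",    "Q: What is {0} rounded to the nearest {1}?\nA:")
    , ("remain",   "Q: What is the remainder when {0} is divided by {1}?\nA:")
    , ("seq",      "Q: What comes next: {4}, {5}, {6}, {7}...?\nA:")
    , ("v+",       "Q: What is {1} more than {0}?\nA:")
    , ("v-",       "Q: What is {1} less than {0}?\nA:")
    , ("3*",       "Q: What is {0} {3} {1} {3} {2}?\nA:")
    , ("3+",       "Q: What is {0} {3} {1} {3} {2}?\nA:")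
    , ("3-",       "Q: What is {0} {3} {1} {3} {2}?\nA:")
    , ("frac",     "Q: What is {0}/{1} in reduced form?\nA:") ]

def pvDefaultTemplate : String := "Q: What is {0} {8} {1}?\nA:"

-- Source B's _render scan: on '{' read the digit at i+1, substitute slots[int(digit)], skip 3
-- (template[i+1] exists and slots[int(template[i+1])] is in range for every template above,
-- so headD/pyGetD defaults are never taken; exact for these templates)
def pvRender (slots : List String) : List Char → List Char
  | [] => []
  | '{' :: d :: _ :: rest =>
      (PySem.List.pyGetD slots ((PySem.Int.ofChars? [d]).getD 0) "").toList ++ pvRender slots rest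
  | '{' :: rest =>
      (PySem.List.pyGetD slots ((PySem.Int.ofChars? [rest.headD ' ']).getD 0) "").toList
  | c :: rest => c :: pvRender slots rest

def generate_math_prompt_alt (operation : String) (x1 : Int) (x2 : Int) (separator : String) (x3 : Option Int) : String :=
  let fmt : Int → String := if separator.toList.length ≠ 0 then pvCommaFmt else PySem.Int.toStr
  let slots : List String :=
    [fmt x1, fmt x2, pvStrOpt x3, PySem.Str.slice operation (some (-1)) none,
     fmt x1, fmt (x1 + x2), fmt (x1 + 2 * x2), fmt (x1 + 3 * x2), operation]
  String.ofList (pvRender slots ((pvTemplates.get? operation).getD pvDefaultTemplate).toList)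

-- ===== PRECONDITION & SPEC =====
def Spec_generate_math_prompt (operation : String) (x1 : Int) (x2 : Int) (separator : String) (x3 : Option Int) (out : String) : Prop := out = generate_math_prompt_alt operation x1 x2 separator x3
instance (operation : String) (x1 : Int) (x2 : Int) (separator : String) (x3 : Option Int) (out : String) : Decidable (Spec_generate_math_prompt operation x1 x2 separator x3 out) := by unfold Spec_generate_math_prompt; infer_instance

-- ===== CLAIM =====
def Claim_equal_generate_math_prompt : Prop := ∀ (operation : String) (x1 : Int) (x2 : Int) (separator : String) (x3 : Option Int), Dom_generate_math_prompt operation x1 x2 separator x3 → Spec_generate_math_prompt operation x1 x2 separator x3 (generate_math_prompt operation x1 x2 separator x3)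

-- ===== LEMMAS AND PROOFS =====

lemma pvTemplates_eq_mk :
  pvTemplates = PySem.Dict.mk
    [ ("%", "Q: What is {1}% of {0}?\nA:")
    , ("<", "Q: Name any number smaller than {0}?\nA:")
    , (">", "Q: Name any number larger than {0}?\nA:")
    , ("prime", "Q: Name any prime number smaller than {0}?\nA:")
    , ("square", "Q: Name any perfect square smaller than {0}?\nA:")
    , ("2sum", "Q: Name two numbers that sum to {0}?\nA:")
    , ("multiple", "Q: Name a single multiple of {2} between {0} and {1}?\nA:")
    , ("round", "Q: What is {0} rounded to the nearest {1}?\nA:")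
    , ("remain", "Q: What is the remainder when {0} is divided by {1}?\nA:")
    , ("seq", "Q: What comes next: {4}, {5}, {6}, {7}...?\nA:")
    , ("v+", "Q: What is {1} more than {0}?\nA:")
    , ("v-", "Q: What is {1} less than {0}?\nA:")
    , ("3*", "Q: What is {0} {3} {1} {3} {2}?\nA:")
    , ("3+", "Q: What is {0} {3} {1} {3} {2}?\nA:")
    , ("3-", "Q: What is {0} {3} {1} {3} {2}?\nA:")
    , ("frac", "Q: What is {0}/{1} in reduced form?\nA:") ] := by decide

lemma pvLookup_pct : (pvTemplates.get? "%").getD pvDefaultTemplate = "Q: What is {1}% of {0}?\nA:" := by decide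

lemma pvRender_pct (s0 s1 s2 s3 s4 s5 s6 s7 s8 : String) :
    pvRender [s0,s1,s2,s3,s4,s5,s6,s7,s8] "Q: What is {1}% of {0}?\nA:".toList
      = "Q: What is ".toList ++ (s1.toList ++ ("% of ".toList ++ (s0.toList ++ ("?\nA:".toList)))) := rfl

lemma pvLookup_lt : (pvTemplates.get? "<").getD pvDefaultTemplate = "Q: Name any number smaller than {0}?\nA:" := by decide

lemma pvRender_lt (s0 s1 s2 s3 s4 s5 s6 s7 s8 : String) :
    pvRender [s0,s1,s2,s3,s4,s5,s6,s7,s8] "Q: Name any number smaller than {0}?\nA:".toList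
      = "Q: Name any number smaller than ".toList ++ (s0.toList ++ ("?\nA:".toList)) := rfl

lemma pvLookup_gt : (pvTemplates.get? ">").getD pvDefaultTemplate = "Q: Name any number larger than {0}?\nA:" := by decide

lemma pvRender_gt (s0 s1 s2 s3 s4 s5 s6 s7 s8 : String) :
    pvRender [s0,s1,s2,s3,s4,s5,s6,s7,s8] "Q: Name any number larger than {0}?\nA:".toList
      = "Q: Name any number larger than ".toList ++ (s0.toList ++ ("?\nA:".toList)) := rfl

lemma pvLookup_prime : (pvTemplates.get? "prime").getD pvDefaultTemplate = "Q: Name any prime number smaller than {0}?\nA:" := by decide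

lemma pvRender_prime (s0 s1 s2 s3 s4 s5 s6 s7 s8 : String) :
    pvRender [s0,s1,s2,s3,s4,s5,s6,s7,s8] "Q: Name any prime number smaller than {0}?\nA:".toList
      = "Q: Name any prime number smaller than ".toList ++ (s0.toList ++ ("?\nA:".toList)) := rfl

lemma pvLookup_square : (pvTemplates.get? "square").getD pvDefaultTemplate = "Q: Name any perfect square smaller than {0}?\nA:" := by decide

lemma pvRender_square (s0 s1 s2 s3 s4 s5 s6 s7 s8 : String) :
    pvRender [s0,s1,s2,s3,s4,s5,s6,s7,s8] "Q: Name any perfect square smaller than {0}?\nA:".toList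
      = "Q: Name any perfect square smaller than ".toList ++ (s0.toList ++ ("?\nA:".toList)) := rfl

lemma pvLookup_twosum : (pvTemplates.get? "2sum").getD pvDefaultTemplate = "Q: Name two numbers that sum to {0}?\nA:" := by decide

lemma pvRender_twosum (s0 s1 s2 s3 s4 s5 s6 s7 s8 : String) :
    pvRender [s0,s1,s2,s3,s4,s5,s6,s7,s8] "Q: Name two numbers that sum to {0}?\nA:".toList
      = "Q: Name two numbers that sum to ".toList ++ (s0.toList ++ ("?\nA:".toList)) := rfl

lemma pvLookup_multiple : (pvTemplates.get? "multiple").getD pvDefaultTemplate = "Q: Name a single multiple of {2} between {0} and {1}?\nA:" := by decide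

lemma pvRender_multiple (s0 s1 s2 s3 s4 s5 s6 s7 s8 : String) :
    pvRender [s0,s1,s2,s3,s4,s5,s6,s7,s8] "Q: Name a single multiple of {2} between {0} and {1}?\nA:".toList
      = "Q: Name a single multiple of ".toList ++ (s2.toList ++ (" between ".toList ++ (s0.toList ++ (" and ".toList ++ (s1.toList ++ ("?\nA:".toList)))))) := rfl

lemma pvLookup_round : (pvTemplates.get? "round").getD pvDefaultTemplate = "Q: What is {0} rounded to the nearest {1}?\nA:" := by decide

lemma pvRender_round (s0 s1 s2 s3 s4 s5 s6 s7 s8 : String) :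
    pvRender [s0,s1,s2,s3,s4,s5,s6,s7,s8] "Q: What is {0} rounded to the nearest {1}?\nA:".toList
      = "Q: What is ".toList ++ (s0.toList ++ (" rounded to the nearest ".toList ++ (s1.toList ++ ("?\nA:".toList)))) := rfl

lemma pvLookup_remain : (pvTemplates.get? "remain").getD pvDefaultTemplate = "Q: What is the remainder when {0} is divided by {1}?\nA:" := by decide

lemma pvRender_remain (s0 s1 s2 s3 s4 s5 s6 s7 s8 : String) :
    pvRender [s0,s1,s2,s3,s4,s5,s6,s7,s8] "Q: What is the remainder when {0} is divided by {1}?\nA:".toList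
      = "Q: What is the remainder when ".toList ++ (s0.toList ++ (" is divided by ".toList ++ (s1.toList ++ ("?\nA:".toList)))) := rfl

lemma pvLookup_seq : (pvTemplates.get? "seq").getD pvDefaultTemplate = "Q: What comes next: {4}, {5}, {6}, {7}...?\nA:" := by decide

lemma pvRender_seq (s0 s1 s2 s3 s4 s5 s6 s7 s8 : String) :
    pvRender [s0,s1,s2,s3,s4,s5,s6,s7,s8] "Q: What comes next: {4}, {5}, {6}, {7}...?\nA:".toList
      = "Q: What comes next: ".toList ++ (s4.toList ++ (", ".toList ++ (s5.toList ++ (", ".toList ++ (s6.toList ++ (", ".toList ++ (s7.toList ++ ("...?\nA:".toList)))))))) := rfl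

lemma pvLookup_vplus : (pvTemplates.get? "v+").getD pvDefaultTemplate = "Q: What is {1} more than {0}?\nA:" := by decide

lemma pvRender_vplus (s0 s1 s2 s3 s4 s5 s6 s7 s8 : String) :
    pvRender [s0,s1,s2,s3,s4,s5,s6,s7,s8] "Q: What is {1} more than {0}?\nA:".toList
      = "Q: What is ".toList ++ (s1.toList ++ (" more than ".toList ++ (s0.toList ++ ("?\nA:".toList)))) := rfl

lemma pvLookup_vminus : (pvTemplates.get? "v-").getD pvDefaultTemplate = "Q: What is {1} less than {0}?\nA:" := by decide

lemma pvRender_vminus (s0 s1 s2 s3 s4 s5 s6 s7 s8 : String) :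
    pvRender [s0,s1,s2,s3,s4,s5,s6,s7,s8] "Q: What is {1} less than {0}?\nA:".toList
      = "Q: What is ".toList ++ (s1.toList ++ (" less than ".toList ++ (s0.toList ++ ("?\nA:".toList)))) := rfl

lemma pvLookup_tstar : (pvTemplates.get? "3*").getD pvDefaultTemplate = "Q: What is {0} {3} {1} {3} {2}?\nA:" := by decide

lemma pvRender_tstar (s0 s1 s2 s3 s4 s5 s6 s7 s8 : String) :
    pvRender [s0,s1,s2,s3,s4,s5,s6,s7,s8] "Q: What is {0} {3} {1} {3} {2}?\nA:".toList
      = "Q: What is ".toList ++ (s0.toList ++ (" ".toList ++ (s3.toList ++ (" ".toList ++ (s1.toList ++ (" ".toList ++ (s3.toList ++ (" ".toList ++ (s2.toList ++ ("?\nA:".toList)))))))))) := rfl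

lemma pvLookup_tplus : (pvTemplates.get? "3+").getD pvDefaultTemplate = "Q: What is {0} {3} {1} {3} {2}?\nA:" := by decide

lemma pvRender_tplus (s0 s1 s2 s3 s4 s5 s6 s7 s8 : String) :
    pvRender [s0,s1,s2,s3,s4,s5,s6,s7,s8] "Q: What is {0} {3} {1} {3} {2}?\nA:".toList
      = "Q: What is ".toList ++ (s0.toList ++ (" ".toList ++ (s3.toList ++ (" ".toList ++ (s1.toList ++ (" ".toList ++ (s3.toList ++ (" ".toList ++ (s2.toList ++ ("?\nA:".toList)))))))))) := rfl

lemma pvLookup_tminus : (pvTemplates.get? "3-").getD pvDefaultTemplate = "Q: What is {0} {3} {1} {3} {2}?\nA:" := by decide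

lemma pvRender_tminus (s0 s1 s2 s3 s4 s5 s6 s7 s8 : String) :
    pvRender [s0,s1,s2,s3,s4,s5,s6,s7,s8] "Q: What is {0} {3} {1} {3} {2}?\nA:".toList
      = "Q: What is ".toList ++ (s0.toList ++ (" ".toList ++ (s3.toList ++ (" ".toList ++ (s1.toList ++ (" ".toList ++ (s3.toList ++ (" ".toList ++ (s2.toList ++ ("?\nA:".toList)))))))))) := rfl

lemma pvLookup_frac : (pvTemplates.get? "frac").getD pvDefaultTemplate = "Q: What is {0}/{1} in reduced form?\nA:" := by decide

lemma pvRender_frac (s0 s1 s2 s3 s4 s5 s6 s7 s8 : String) :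
    pvRender [s0,s1,s2,s3,s4,s5,s6,s7,s8] "Q: What is {0}/{1} in reduced form?\nA:".toList
      = "Q: What is ".toList ++ (s0.toList ++ ("/".toList ++ (s1.toList ++ (" in reduced form?\nA:".toList)))) := rfl

lemma pvRender_default (s0 s1 s2 s3 s4 s5 s6 s7 s8 : String) :
    pvRender [s0,s1,s2,s3,s4,s5,s6,s7,s8] "Q: What is {0} {8} {1}?\nA:".toList
      = "Q: What is ".toList ++ (s0.toList ++ (" ".toList ++ (s8.toList ++ (" ".toList ++ (s1.toList ++ ("?\nA:".toList)))))) := rfl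


-- ===== VERDICT =====
theorem generate_math_prompt_spec : Claim_equal_generate_math_prompt := by
  intro operation x1 x2 separator x3 _
  unfold Spec_generate_math_prompt
  by_cases h1 : operation = "%"
  · subst h1
    apply String.toList_injective
    simp only [generate_math_prompt, generate_math_prompt_alt, pvLookup_pct, pvRender_pct]
    by_cases hsep : separator = "" <;> simp [hsep]
  by_cases h2 : operation = "<"
  · subst h2
    apply String.toList_injective
    simp only [generate_math_prompt, generate_math_prompt_alt, pvLookup_lt, pvRender_lt]
    by_cases hsep : separator = "" <;> simp [hsep]
  by_cases h3 : operation = ">"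
  · subst h3
    apply String.toList_injective
    simp only [generate_math_prompt, generate_math_prompt_alt, pvLookup_gt, pvRender_gt]
    by_cases hsep : separator = "" <;> simp [hsep]
  by_cases h4 : operation = "prime"
  · subst h4
    apply String.toList_injective
    simp only [generate_math_prompt, generate_math_prompt_alt, pvLookup_prime, pvRender_prime]
    by_cases hsep : separator = "" <;> simp [hsep]
  by_cases h5 : operation = "square"
  · subst h5
    apply String.toList_injective
    simp only [generate_math_prompt, generate_math_prompt_alt, pvLookup_square, pvRender_square]
    by_cases hsep : separator = "" <;> simp [hsep]
  by_cases h6 : operation = "2sum"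
  · subst h6
    apply String.toList_injective
    simp only [generate_math_prompt, generate_math_prompt_alt, pvLookup_twosum, pvRender_twosum]
    by_cases hsep : separator = "" <;> simp [hsep]
  by_cases h7 : operation = "multiple"
  · subst h7
    apply String.toList_injective
    simp only [generate_math_prompt, generate_math_prompt_alt, pvLookup_multiple, pvRender_multiple]
    by_cases hsep : separator = "" <;> simp [hsep]
  by_cases h8 : operation = "round"
  · subst h8
    apply String.toList_injective
    simp only [generate_math_prompt, generate_math_prompt_alt, pvLookup_round, pvRender_round]
    by_cases hsep : separator = "" <;> simp [hsep]
  by_cases h9 : operation = "remain"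
  · subst h9
    apply String.toList_injective
    simp only [generate_math_prompt, generate_math_prompt_alt, pvLookup_remain, pvRender_remain]
    by_cases hsep : separator = "" <;> simp [hsep]
  by_cases h10 : operation = "seq"
  · subst h10
    apply String.toList_injective
    simp only [generate_math_prompt, generate_math_prompt_alt, pvLookup_seq, pvRender_seq]
    by_cases hsep : separator = "" <;> simp [hsep]
  by_cases h11 : operation = "v+"
  · subst h11
    apply String.toList_injective
    simp only [generate_math_prompt, generate_math_prompt_alt, pvLookup_vplus, pvRender_vplus]
    by_cases hsep : separator = "" <;> simp [hsep]
  by_cases h12 : operation = "v-"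
  · subst h12
    apply String.toList_injective
    simp only [generate_math_prompt, generate_math_prompt_alt, pvLookup_vminus, pvRender_vminus]
    by_cases hsep : separator = "" <;> simp [hsep]
  by_cases h13 : operation = "3*"
  · subst h13
    apply String.toList_injective
    simp only [generate_math_prompt, generate_math_prompt_alt, pvLookup_tstar, pvRender_tstar]
    by_cases hsep : separator = "" <;> simp [hsep, PySem.List.slice, PySem.List.pyGet?, PySem.List.pyIdx?]
  by_cases h14 : operation = "3+"
  · subst h14
    apply String.toList_injective
    simp only [generate_math_prompt, generate_math_prompt_alt, pvLookup_tplus, pvRender_tplus]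
    by_cases hsep : separator = "" <;> simp [hsep, PySem.List.slice, PySem.List.pyGet?, PySem.List.pyIdx?]
  by_cases h15 : operation = "3-"
  · subst h15
    apply String.toList_injective
    simp only [generate_math_prompt, generate_math_prompt_alt, pvLookup_tminus, pvRender_tminus]
    by_cases hsep : separator = "" <;> simp [hsep, PySem.List.slice, PySem.List.pyGet?, PySem.List.pyIdx?]
  by_cases h16 : operation = "frac"
  · subst h16
    apply String.toList_injective
    simp only [generate_math_prompt, generate_math_prompt_alt, pvLookup_frac, pvRender_frac]
    by_cases hsep : separator = "" <;> simp [hsep]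
  apply String.toList_injective
  have hl : pvTemplates.get? operation = none := by
    rw [pvTemplates_eq_mk]
    simp [PySem.Dict.get?, Ne.symm h1, Ne.symm h2, Ne.symm h3, Ne.symm h4, Ne.symm h5, Ne.symm h6, Ne.symm h7, Ne.symm h8, Ne.symm h9, Ne.symm h10, Ne.symm h11, Ne.symm h12, Ne.symm h13, Ne.symm h14, Ne.symm h15, Ne.symm h16]
  simp only [generate_math_prompt, generate_math_prompt_alt, hl, Option.getD_none,
    pvDefaultTemplate, pvRender_default]
  by_cases hsep : separator = "" <;> simp [hsep, h1, h2, h3, h4, h5, h6, h7, h8, h9, h10, h11, h12, h13, h14, h15, h16]
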